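-- pv_equiv track=rewrite | github.com/AlexMilenkov1/Fundamentals-Python | list_advanced/EXE/electron_distribution.py | filling_shells
-- ===== SOURCE A (Python) =====
-- def filling_shells(current_electrons):
--     list_of_shells = []
--
--     index = 1
--
--     while current_electrons > 0:
--         maximum_electrons_in_shell = 2 * (index ** 2)
--
--         if maximum_electrons_in_shell > current_electrons:
--             list_of_shells.append(current_electrons)
--         else:
--             list_of_shells.append(maximum_electrons_in_shell)
--
--         current_electrons -= maximum_electrons_in_shell
--
--         index += 1
--
--     return list_of_shells
-- ===== SOURCE B (Python) =====
-- def filling_shells(current_electrons):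
--     if current_electrons <= 0:
--         return []
--     k = 0
--     total = 0
--     while total + 2 * (k + 1) ** 2 <= current_electrons:
--         k += 1
--         total += 2 * k ** 2
--     shells = [2 * i ** 2 for i in range(1, k + 1)]
--     rem = current_electrons - total
--     if rem > 0:
--         shells.append(rem)
--     return shells
-- ===== Notes on version B (the rewrite author's own statement) =====
-- stated objective: alternative
-- what changed: A fills shells in one guarded subtract-loop deciding full-vs-partial inside the loop; B first counts the completely-filled shells by accumulating capacities, then builds the output as a comprehension of full shells plus an optional leftover element.
import Mathlib
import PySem

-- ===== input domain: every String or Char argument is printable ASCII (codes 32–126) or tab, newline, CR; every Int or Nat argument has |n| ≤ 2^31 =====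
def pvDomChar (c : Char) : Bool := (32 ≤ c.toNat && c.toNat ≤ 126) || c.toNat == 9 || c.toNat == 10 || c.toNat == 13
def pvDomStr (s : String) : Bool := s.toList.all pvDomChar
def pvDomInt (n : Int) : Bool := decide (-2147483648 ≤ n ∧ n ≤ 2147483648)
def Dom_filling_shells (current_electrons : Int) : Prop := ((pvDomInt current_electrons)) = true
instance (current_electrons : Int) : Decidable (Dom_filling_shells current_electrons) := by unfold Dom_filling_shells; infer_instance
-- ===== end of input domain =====

-- B restructures A's single subtract-loop into: count fully-filled shells, emit them by comprehension, append the positive remainder.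

-- ===== PORT A =====
-- A's while loop; j = index - 1 (a Nat so the capacity 2*(j+1)^2 is positive, giving termination).
def fillingLoopA (e : Int) (j : Nat) : List Int :=
  if 0 < e then
    (if 2 * ((j : Int) + 1) ^ 2 > e then [e] else [2 * ((j : Int) + 1) ^ 2])
      ++ fillingLoopA (e - 2 * ((j : Int) + 1) ^ 2) (j + 1)
  else []
termination_by e.toNat
decreasing_by
  have hc : (0 : Int) < ((j : Int) + 1) ^ 2 := by positivity
  omega

def filling_shells (current_electrons : Int) : List Int :=
  fillingLoopA current_electrons 0

-- ===== PORT B =====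
-- B's counting loop: k full shells so far, total electrons they hold.
def countFull (e : Int) (k : Nat) (total : Int) : Nat × Int :=
  if total + 2 * ((k : Int) + 1) ^ 2 ≤ e then
    countFull e (k + 1) (total + 2 * ((k : Int) + 1) ^ 2)
  else (k, total)
termination_by (e - total).toNat
decreasing_by
  have hc : (0 : Int) < ((k : Int) + 1) ^ 2 := by positivity
  omega

def filling_shells_alt (current_electrons : Int) : List Int :=
  if current_electrons ≤ 0 then []
  else
    let p := countFull current_electrons 0 0
    let shells := (List.range p.1).map (fun (i : Nat) => 2 * ((i : Int) + 1) ^ 2)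
    let rem := current_electrons - p.2
    if 0 < rem then shells ++ [rem] else shells

-- ===== PRECONDITION & SPEC =====
def Spec_filling_shells (current_electrons : Int) (out : List Int) : Prop := out = filling_shells_alt current_electrons
instance (current_electrons : Int) (out : List Int) : Decidable (Spec_filling_shells current_electrons out) := by unfold Spec_filling_shells; infer_instance

-- ===== CLAIM (what is proved, stated in full; the proofs are below) =====
def Claim_equal_filling_shells : Prop := ∀ (current_electrons : Int), Dom_filling_shells current_electrons → Spec_filling_shells current_electrons (filling_shells current_electrons)

-- ===== LEMMAS AND PROOFS =====

-- proof helper: from budget b and starting offset j, the final index and the electrons consumed by full shells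
def gAux (b : Int) (j : Nat) : Nat × Int :=
  if 2 * ((j : Int) + 1) ^ 2 ≤ b then
    let p := gAux (b - 2 * ((j : Int) + 1) ^ 2) (j + 1)
    (p.1, p.2 + 2 * ((j : Int) + 1) ^ 2)
  else (j, 0)
termination_by b.toNat
decreasing_by
  have hc : (0 : Int) < ((j : Int) + 1) ^ 2 := by positivity
  omega

lemma gAux_pos (b : Int) (j : Nat) (h : 2 * ((j : Int) + 1) ^ 2 ≤ b) :
    gAux b j = ((gAux (b - 2 * ((j : Int) + 1) ^ 2) (j + 1)).1,
                (gAux (b - 2 * ((j : Int) + 1) ^ 2) (j + 1)).2 + 2 * ((j : Int) + 1) ^ 2) := by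
  rw [gAux, if_pos h]

lemma gAux_neg (b : Int) (j : Nat) (h : ¬ 2 * ((j : Int) + 1) ^ 2 ≤ b) :
    gAux b j = (j, 0) := by
  rw [gAux, if_neg h]

lemma gAux_fst_ge (b : Int) (j : Nat) : j ≤ (gAux b j).1 := by
  induction b, j using gAux.induct with
  | case1 b j h ih =>
    rw [gAux_pos b j h]
    exact Nat.le_trans (Nat.le_succ j) ih
  | case2 b j h =>
    rw [gAux_neg b j h]

lemma countFull_eq_gAux (e : Int) (k : Nat) (total : Int) :
    countFull e k total = ((gAux (e - total) k).1, total + (gAux (e - total) k).2) := by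
  induction k, total using countFull.induct e with
  | case1 k total h ih =>
    rw [countFull, if_pos h, ih,
        gAux_pos (e - total) k (by omega)]
    have h2 : e - (total + 2 * ((k : Int) + 1) ^ 2) = e - total - 2 * ((k : Int) + 1) ^ 2 := by
      ring
    rw [h2]
    simp only [Prod.mk.injEq, true_and]
    ring
  | case2 k total h =>
    rw [countFull, if_neg h, gAux_neg (e - total) k (by omega)]
    simp

lemma fillingLoopA_eq (b : Int) (j : Nat) :
    fillingLoopA b j =
      (if 0 < b then
        ((List.range' (j + 1) ((gAux b j).1 - j)).map (fun (i : Nat) => 2 * (i : Int) ^ 2))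
          ++ (if 0 < b - (gAux b j).2 then [b - (gAux b j).2] else [])
      else []) := by
  induction b, j using fillingLoopA.induct with
  | case1 b j hb ih =>
    rw [fillingLoopA, if_pos hb, ih, if_pos hb]
    by_cases h : 2 * ((j : Int) + 1) ^ 2 ≤ b
    · -- full shell
      rw [gAux_pos b j h,
          if_neg (show ¬ 2 * ((j : Int) + 1) ^ 2 > b from by omega)]
      by_cases h2 : 0 < b - 2 * ((j : Int) + 1) ^ 2
      · rw [if_pos h2]
        have hge := gAux_fst_ge (b - 2 * ((j : Int) + 1) ^ 2) (j + 1)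
        have hr : (gAux (b - 2 * ((j : Int) + 1) ^ 2) (j + 1)).1 - j
            = ((gAux (b - 2 * ((j : Int) + 1) ^ 2) (j + 1)).1 - (j + 1)) + 1 := by omega
        rw [hr, List.range'_succ, List.map_cons]
        have h3 : b - 2 * ((j : Int) + 1) ^ 2 - (gAux (b - 2 * ((j : Int) + 1) ^ 2) (j + 1)).2
            = b - ((gAux (b - 2 * ((j : Int) + 1) ^ 2) (j + 1)).2 + 2 * ((j : Int) + 1) ^ 2) := by
          ring
        rw [h3]
        simp
      · rw [if_neg h2]
        have hg : gAux (b - 2 * ((j : Int) + 1) ^ 2) (j + 1) = (j + 1, 0) := by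
          apply gAux_neg
          have hpos : (0 : Int) < ((((j : Nat) + 1 : Nat) : Int) + 1) ^ 2 := by positivity
          omega
        rw [hg]
        have h4 : (j + 1, (0 : Int)).1 - j = 1 := by omega
        rw [h4, List.range'_one]
        have h5 : ¬ 0 < b - ((j + 1, (0 : Int)).2 + 2 * ((j : Int) + 1) ^ 2) := by
          simp only
          omega
        rw [if_neg h5]
        simp
    · -- partial shell: loop body appends e and next iteration stops
      rw [gAux_neg b j h,
          if_pos (show 2 * ((j : Int) + 1) ^ 2 > b from by omega),
          if_neg (show ¬ 0 < b - 2 * ((j : Int) + 1) ^ 2 from by omega)]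
      simp [hb]
  | case2 b j hb =>
    rw [fillingLoopA, if_neg hb, if_neg hb]

lemma range'_one_map (k : Nat) :
    (List.range' 1 k).map (fun (i : Nat) => 2 * (i : Int) ^ 2)
      = (List.range k).map (fun (i : Nat) => 2 * ((i : Int) + 1) ^ 2) := by
  rw [List.range'_eq_map_range, List.map_map]
  apply List.map_congr_left
  intro i _
  simp only [Function.comp]
  push_cast
  ring

-- ===== VERDICT (by name: the statement is the Claim_ definition above) =====
theorem filling_shells_spec : Claim_equal_filling_shells := by
  intro e _
  unfold Spec_filling_shells filling_shells filling_shells_alt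
  rw [fillingLoopA_eq, countFull_eq_gAux]
  by_cases he : e ≤ 0
  · rw [if_neg (by omega), if_pos he]
  · rw [if_pos (by omega), if_neg he]
    simp only [Nat.sub_zero, zero_add]
    rw [range'_one_map]
    by_cases hr : 0 < e - (gAux (e - 0) 0).2
    · rw [if_pos (by simpa using hr), if_pos (by simpa using hr)]
      simp
    · rw [if_neg (by simpa using hr), if_neg (by simpa using hr)]
      simp
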